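-- pv_equiv track=rewrite | github.com/jobobert/Delve | tools/graph_common.py | node_header_color
-- ===== SOURCE A (Python) =====
-- C_NEUTRAL     = "#EEEEEE"   # no script ops
--
-- C_FLAG        = "#FFF9C4"   # sets a flag (pale yellow)
--
-- C_ITEM        = "#FFE0B2"   # gives item / gold / xp (pale orange)
--
-- C_QUEST_ADV   = "#FFD54F"   # advances or starts a quest (amber)
--
-- C_QUEST_DONE  = "#A5D6A7"   # completes a quest (green)
--
-- C_DAMAGE      = "#FFCDD2"   # damage / fail (pink-red)
--
-- _QUEST_ADVANCING_OPS = {"advance_quest"}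
--
-- _QUEST_DONE_OPS      = {"complete_quest"}
--
-- _ITEM_OPS            = {"give_item", "take_item", "spawn_item", "give_gold", "give_xp"}
--
-- _DAMAGE_OPS          = {"damage", "fail"}
--
-- def node_header_color(script: list) -> str:
--     """Return the header cell color based on most significant script op."""
--     op_names = {op.get("op", "") for op in script if isinstance(op, dict)}
--     if op_names & _QUEST_DONE_OPS:
--         return C_QUEST_DONE
--     if op_names & _QUEST_ADVANCING_OPS:
--         return C_QUEST_ADV
--     if op_names & _ITEM_OPS:
--         return C_ITEM
--     if op_names & _DAMAGE_OPS:
--         return C_DAMAGE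
--     if "set_flag" in op_names or "clear_flag" in op_names:
--         return C_FLAG
--     return C_NEUTRAL
-- ===== SOURCE B (Python) =====
-- C_NEUTRAL     = "#EEEEEE"
-- C_FLAG        = "#FFF9C4"
-- C_ITEM        = "#FFE0B2"
-- C_QUEST_ADV   = "#FFD54F"
-- C_QUEST_DONE  = "#A5D6A7"
-- C_DAMAGE      = "#FFCDD2"
--
-- _RANK = {
--     "complete_quest": 5,
--     "advance_quest": 4,
--     "give_item": 3, "take_item": 3, "spawn_item": 3, "give_gold": 3, "give_xp": 3,
--     "damage": 2, "fail": 2,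
--     "set_flag": 1, "clear_flag": 1,
-- }
--
-- _COLORS = [C_NEUTRAL, C_FLAG, C_DAMAGE, C_ITEM, C_QUEST_ADV, C_QUEST_DONE]
--
-- def node_header_color(script: list) -> str:
--     """Return the header cell color based on most significant script op."""
--     best = 0
--     for op in script:
--         if isinstance(op, dict):
--             r = _RANK.get(op.get("op", ""), 0)
--             if r > best:
--                 best = r
--     return _COLORS[best]
-- ===== Notes on version B (the rewrite author's own statement) =====
-- stated objective: alternative
-- what changed: Replaced the five priority-ordered set-intersection checks over a set of op names by a single max-rank scan: a rank table maps each op to an integer significance, one pass keeps the maximum rank, and a rank-to-color list yields the result.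
import Mathlib
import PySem

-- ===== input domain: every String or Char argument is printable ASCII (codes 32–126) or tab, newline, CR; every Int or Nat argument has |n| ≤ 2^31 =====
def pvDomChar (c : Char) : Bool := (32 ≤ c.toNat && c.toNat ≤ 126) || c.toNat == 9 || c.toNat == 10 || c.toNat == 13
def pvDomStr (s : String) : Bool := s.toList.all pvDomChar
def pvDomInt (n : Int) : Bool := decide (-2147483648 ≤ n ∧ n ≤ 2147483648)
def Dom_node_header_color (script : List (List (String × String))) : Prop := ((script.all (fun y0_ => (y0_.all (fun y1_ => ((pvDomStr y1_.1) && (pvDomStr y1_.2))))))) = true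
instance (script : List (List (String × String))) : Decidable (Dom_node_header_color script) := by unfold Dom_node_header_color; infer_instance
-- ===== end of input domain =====

-- B replaces A's five priority-ordered set-intersection checks by a single max-rank scan
-- with a rank table and a rank→color list (objective: alternative/simpler decomposition).

-- ===== PORT A =====
def pvC_NEUTRAL : String := "#EEEEEE"
def pvC_FLAG : String := "#FFF9C4"
def pvC_ITEM : String := "#FFE0B2"
def pvC_QUEST_ADV : String := "#FFD54F"
def pvC_QUEST_DONE : String := "#A5D6A7"
def pvC_DAMAGE : String := "#FFCDD2"
def pvQuestAdvancingOps : PySem.Set String := PySem.Set.ofList ["advance_quest"]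
def pvQuestDoneOps : PySem.Set String := PySem.Set.ofList ["complete_quest"]
def pvItemOps : PySem.Set String := PySem.Set.ofList ["give_item", "take_item", "spawn_item", "give_gold", "give_xp"]
def pvDamageOps : PySem.Set String := PySem.Set.ofList ["damage", "fail"]

-- op.get("op", ""): every entry of `script` is a dict under the type convention
def node_header_color (script : List (List (String × String))) : String :=
  let op_names : PySem.Set String :=
    PySem.Set.ofList (script.map (fun op => (PySem.Dict.mk op).getD "op" ""))
  if PySem.Set.inter op_names pvQuestDoneOps ≠ [] then pvC_QUEST_DONE
  else if PySem.Set.inter op_names pvQuestAdvancingOps ≠ [] then pvC_QUEST_ADV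
  else if PySem.Set.inter op_names pvItemOps ≠ [] then pvC_ITEM
  else if PySem.Set.inter op_names pvDamageOps ≠ [] then pvC_DAMAGE
  else if "set_flag" ∈ op_names ∨ "clear_flag" ∈ op_names then pvC_FLAG
  else pvC_NEUTRAL

-- ===== PORT B =====
def pvRankDict : PySem.Dict String Int :=
  PySem.Dict.ofList [("complete_quest", 5), ("advance_quest", 4),
    ("give_item", 3), ("take_item", 3), ("spawn_item", 3), ("give_gold", 3), ("give_xp", 3),
    ("damage", 2), ("fail", 2), ("set_flag", 1), ("clear_flag", 1)]

def pvColors : List String :=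
  [pvC_NEUTRAL, pvC_FLAG, pvC_DAMAGE, pvC_ITEM, pvC_QUEST_ADV, pvC_QUEST_DONE]

def node_header_color_alt (script : List (List (String × String))) : String :=
  let best : Int := script.foldl (fun best op =>
    let r := pvRankDict.getD ((PySem.Dict.mk op).getD "op" "") 0
    if r > best then r else best) 0
  -- _COLORS[best]: best is always in range, so the default is never used
  PySem.List.pyGetD pvColors best ""

-- ===== PRECONDITION & SPEC =====
def Spec_node_header_color (script : List (List (String × String))) (out : String) : Prop := out = node_header_color_alt script
instance (script : List (List (String × String))) (out : String) : Decidable (Spec_node_header_color script out) := by unfold Spec_node_header_color; infer_instance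

-- ===== CLAIM (what is proved, stated in full; the proofs are below) =====
def Claim_equal_node_header_color : Prop := ∀ (script : List (List (String × String))), Dom_node_header_color script → Spec_node_header_color script (node_header_color script)

-- ===== LEMMAS AND PROOFS =====

-- the rank table as a plain if-chain
def pvRankFn (s : String) : Int :=
  if s = "complete_quest" then 5 else if s = "advance_quest" then 4
  else if s = "give_item" then 3 else if s = "take_item" then 3 else if s = "spawn_item" then 3
  else if s = "give_gold" then 3 else if s = "give_xp" then 3
  else if s = "damage" then 2 else if s = "fail" then 2
  else if s = "set_flag" then 1 else if s = "clear_flag" then 1 else 0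

set_option maxHeartbeats 2000000 in
theorem pvRank_eq (s : String) : pvRankDict.getD s 0 = pvRankFn s := by
  simp only [pvRankDict, PySem.Dict.ofList, PySem.Dict.update, List.foldl,
    PySem.Dict.getD_insert, PySem.Dict.getD_empty]
  unfold pvRankFn
  split_ifs <;> simp_all

theorem pvRankFn_nonneg (s : String) : 0 ≤ pvRankFn s := by
  unfold pvRankFn; split_ifs <;> omega

theorem pvRankFn_le5 (s : String) : pvRankFn s ≤ 5 := by
  unfold pvRankFn; split_ifs <;> omega

def pvRankMax : List String → Int
  | [] => 0
  | x :: xs => max (pvRankFn x) (pvRankMax xs)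

theorem pvRankMax_nonneg (ns : List String) : 0 ≤ pvRankMax ns := by
  induction ns with
  | nil => simp [pvRankMax]
  | cons x xs ih => simp only [pvRankMax]; omega

theorem pvRankMax_le5 (ns : List String) : pvRankMax ns ≤ 5 := by
  induction ns with
  | nil => simp [pvRankMax]
  | cons x xs ih =>
      have := pvRankFn_le5 x
      simp only [pvRankMax]; omega

theorem pvFold_eq (script : List (List (String × String))) (acc : Int) (hacc : 0 ≤ acc) :
    script.foldl (fun best op =>
        let r := pvRankDict.getD ((PySem.Dict.mk op).getD "op" "") 0
        if r > best then r else best) acc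
      = max acc (pvRankMax (script.map (fun op => (PySem.Dict.mk op).getD "op" ""))) := by
  induction script generalizing acc with
  | nil => simp only [List.foldl_nil, List.map_nil, pvRankMax]; omega
  | cons op rest ih =>
      simp only [List.foldl_cons, List.map_cons, pvRankMax]
      simp only [pvRank_eq] at ih ⊢
      have h0 : (0:Int) ≤ if pvRankFn ((PySem.Dict.mk op).getD "op" "") > acc
          then pvRankFn ((PySem.Dict.mk op).getD "op" "") else acc := by
        split_ifs <;> omega
      rw [ih _ h0]
      have := pvRankFn_nonneg ((PySem.Dict.mk op).getD "op" "")
      split_ifs <;> omega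

theorem pvLe_rankMax_iff (k : Int) (hk : 0 < k) (ns : List String) :
    k ≤ pvRankMax ns ↔ ∃ x ∈ ns, k ≤ pvRankFn x := by
  induction ns with
  | nil =>
      simp only [pvRankMax]
      constructor
      · intro h; omega
      · rintro ⟨x, hx, -⟩; simp at hx
  | cons x xs ih =>
      simp only [pvRankMax, le_max_iff, ih, List.mem_cons]
      constructor
      · rintro (h | ⟨y, hy, hr⟩)
        · exact ⟨x, Or.inl rfl, h⟩
        · exact ⟨y, Or.inr hy, hr⟩
      · rintro ⟨y, (rfl | hy), hr⟩
        · exact Or.inl hr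
        · exact Or.inr ⟨y, hy, hr⟩

theorem pvInter_ne_nil_iff (s t : List String) :
    PySem.Set.inter (PySem.Set.ofList s) t ≠ [] ↔ ∃ x ∈ s, x ∈ t := by
  rw [ne_eq, List.eq_nil_iff_forall_not_mem]
  push_neg
  constructor
  · rintro ⟨x, hx⟩
    have := (PySem.Set.mem_inter (PySem.Set.ofList s) t x).mp hx
    exact ⟨x, (PySem.Set.mem_ofList s x).mp this.1, this.2⟩
  · rintro ⟨x, hs, ht⟩
    exact ⟨x, (PySem.Set.mem_inter (PySem.Set.ofList s) t x).mpr
      ⟨(PySem.Set.mem_ofList s x).mpr hs, ht⟩⟩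

-- rankFn thresholds
theorem pvRankFn_ge5 (x : String) : 5 ≤ pvRankFn x ↔ x = "complete_quest" := by
  unfold pvRankFn; split_ifs <;> simp_all
theorem pvRankFn_ge4 (x : String) : 4 ≤ pvRankFn x ↔ x = "complete_quest" ∨ x = "advance_quest" := by
  unfold pvRankFn; split_ifs <;> simp_all
theorem pvRankFn_ge3 (x : String) : 3 ≤ pvRankFn x ↔ x = "complete_quest" ∨ x = "advance_quest"
    ∨ x = "give_item" ∨ x = "take_item" ∨ x = "spawn_item" ∨ x = "give_gold" ∨ x = "give_xp" := by
  unfold pvRankFn; split_ifs <;> simp_all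
theorem pvRankFn_ge2 (x : String) : 2 ≤ pvRankFn x ↔ x = "complete_quest" ∨ x = "advance_quest"
    ∨ x = "give_item" ∨ x = "take_item" ∨ x = "spawn_item" ∨ x = "give_gold" ∨ x = "give_xp"
    ∨ x = "damage" ∨ x = "fail" := by
  unfold pvRankFn; split_ifs <;> simp_all
theorem pvRankFn_ge1 (x : String) : 1 ≤ pvRankFn x ↔ x = "complete_quest" ∨ x = "advance_quest"
    ∨ x = "give_item" ∨ x = "take_item" ∨ x = "spawn_item" ∨ x = "give_gold" ∨ x = "give_xp"
    ∨ x = "damage" ∨ x = "fail" ∨ x = "set_flag" ∨ x = "clear_flag" := by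
  unfold pvRankFn; split_ifs <;> simp_all

-- set literals evaluated
theorem pvQD : pvQuestDoneOps = ["complete_quest"] := by decide
theorem pvQA : pvQuestAdvancingOps = ["advance_quest"] := by decide
theorem pvIT : pvItemOps = ["give_item", "take_item", "spawn_item", "give_gold", "give_xp"] := by decide
theorem pvDM : pvDamageOps = ["damage", "fail"] := by decide

-- ===== VERDICT (by name: the statement is the Claim_ definition above) =====
theorem node_header_color_spec : Claim_equal_node_header_color := by
  intro script _
  unfold Spec_node_header_color node_header_color node_header_color_alt
  simp only []
  rw [pvFold_eq script 0 le_rfl]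
  set names := script.map (fun op => (PySem.Dict.mk op).getD "op" "") with hnames
  rw [max_eq_right (pvRankMax_nonneg names)]
  have hnn := pvRankMax_nonneg names
  have hle := pvRankMax_le5 names
  by_cases h5 : "complete_quest" ∈ names
  · have : 5 ≤ pvRankMax names := (pvLe_rankMax_iff 5 (by omega) names).mpr
      ⟨_, h5, by simp [pvRankFn]⟩
    have hm : pvRankMax names = 5 := by omega
    rw [if_pos ((pvInter_ne_nil_iff names pvQuestDoneOps).mpr ⟨_, h5, by decide⟩), hm]
    rfl
  · have hc1 : ¬ PySem.Set.inter (PySem.Set.ofList names) pvQuestDoneOps ≠ [] := by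
      rw [pvInter_ne_nil_iff]
      rintro ⟨x, hx, hxt⟩
      rw [pvQD] at hxt; simp at hxt; subst hxt; exact h5 hx
    rw [if_neg hc1]
    have hn5 : ¬ 5 ≤ pvRankMax names := fun h => by
      obtain ⟨x, hx, hr⟩ := (pvLe_rankMax_iff 5 (by omega) names).mp h
      exact h5 ((pvRankFn_ge5 x).mp hr ▸ hx)
    by_cases h4 : "advance_quest" ∈ names
    · have : 4 ≤ pvRankMax names := (pvLe_rankMax_iff 4 (by omega) names).mpr
        ⟨_, h4, by simp [pvRankFn]⟩
      have hm : pvRankMax names = 4 := by omega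
      rw [if_pos ((pvInter_ne_nil_iff names pvQuestAdvancingOps).mpr ⟨_, h4, by decide⟩), hm]
      rfl
    · have hc2 : ¬ PySem.Set.inter (PySem.Set.ofList names) pvQuestAdvancingOps ≠ [] := by
        rw [pvInter_ne_nil_iff]
        rintro ⟨x, hx, hxt⟩
        rw [pvQA] at hxt; simp at hxt; subst hxt; exact h4 hx
      rw [if_neg hc2]
      have hn4 : ¬ 4 ≤ pvRankMax names := fun h => by
        obtain ⟨x, hx, hr⟩ := (pvLe_rankMax_iff 4 (by omega) names).mp h
        rcases (pvRankFn_ge4 x).mp hr with h | h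
        · exact h5 (h ▸ hx)
        · exact h4 (h ▸ hx)
      by_cases h3 : ∃ x ∈ names, x ∈ pvItemOps
      · obtain ⟨x, hx, hxt⟩ := h3
        have hxv : x = "give_item" ∨ x = "take_item" ∨ x = "spawn_item" ∨ x = "give_gold" ∨ x = "give_xp" := by
          rw [pvIT] at hxt; simpa using hxt
        have : 3 ≤ pvRankMax names := (pvLe_rankMax_iff 3 (by omega) names).mpr
          ⟨x, hx, by rcases hxv with h|h|h|h|h <;> subst h <;> simp [pvRankFn]⟩
        have hm : pvRankMax names = 3 := by omega
        rw [if_pos ((pvInter_ne_nil_iff names pvItemOps).mpr ⟨x, hx, hxt⟩), hm]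
        rfl
      · have hc3 : ¬ PySem.Set.inter (PySem.Set.ofList names) pvItemOps ≠ [] := by
          rw [pvInter_ne_nil_iff]; exact h3
        rw [if_neg hc3]
        have hn3 : ¬ 3 ≤ pvRankMax names := fun h => by
          obtain ⟨x, hx, hr⟩ := (pvLe_rankMax_iff 3 (by omega) names).mp h
          rcases (pvRankFn_ge3 x).mp hr with h|h|h|h|h|h|h
          · exact h5 (h ▸ hx)
          · exact h4 (h ▸ hx)
          all_goals exact h3 ⟨x, hx, by subst h; decide⟩
        by_cases h2 : ∃ x ∈ names, x ∈ pvDamageOps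
        · obtain ⟨x, hx, hxt⟩ := h2
          have hxv : x = "damage" ∨ x = "fail" := by rw [pvDM] at hxt; simpa using hxt
          have : 2 ≤ pvRankMax names := (pvLe_rankMax_iff 2 (by omega) names).mpr
            ⟨x, hx, by rcases hxv with h|h <;> subst h <;> simp [pvRankFn]⟩
          have hm : pvRankMax names = 2 := by omega
          rw [if_pos ((pvInter_ne_nil_iff names pvDamageOps).mpr ⟨x, hx, hxt⟩), hm]
          rfl
        · have hc4 : ¬ PySem.Set.inter (PySem.Set.ofList names) pvDamageOps ≠ [] := by
            rw [pvInter_ne_nil_iff]; exact h2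
          rw [if_neg hc4]
          have hn2 : ¬ 2 ≤ pvRankMax names := fun h => by
            obtain ⟨x, hx, hr⟩ := (pvLe_rankMax_iff 2 (by omega) names).mp h
            rcases (pvRankFn_ge2 x).mp hr with h|h|h|h|h|h|h|h|h
            · exact h5 (h ▸ hx)
            · exact h4 (h ▸ hx)
            · exact h3 ⟨x, hx, by subst h; decide⟩
            · exact h3 ⟨x, hx, by subst h; decide⟩
            · exact h3 ⟨x, hx, by subst h; decide⟩
            · exact h3 ⟨x, hx, by subst h; decide⟩
            · exact h3 ⟨x, hx, by subst h; decide⟩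
            · exact h2 ⟨x, hx, by subst h; decide⟩
            · exact h2 ⟨x, hx, by subst h; decide⟩
          by_cases h1 : "set_flag" ∈ PySem.Set.ofList names ∨ "clear_flag" ∈ PySem.Set.ofList names
          · have h1' : "set_flag" ∈ names ∨ "clear_flag" ∈ names := by
              rcases h1 with h | h
              · exact Or.inl ((PySem.Set.mem_ofList names _).mp h)
              · exact Or.inr ((PySem.Set.mem_ofList names _).mp h)
            have : 1 ≤ pvRankMax names := (pvLe_rankMax_iff 1 (by omega) names).mpr
              (by rcases h1' with h | h
                  · exact ⟨_, h, by simp [pvRankFn]⟩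
                  · exact ⟨_, h, by simp [pvRankFn]⟩)
            have hm : pvRankMax names = 1 := by omega
            rw [if_pos h1, hm]
            rfl
          · rw [if_neg h1]
            have hn1 : ¬ 1 ≤ pvRankMax names := fun h => by
              obtain ⟨x, hx, hr⟩ := (pvLe_rankMax_iff 1 (by omega) names).mp h
              rcases (pvRankFn_ge1 x).mp hr with h|h|h|h|h|h|h|h|h|h|h
              · exact h5 (h ▸ hx)
              · exact h4 (h ▸ hx)
              · exact h3 ⟨x, hx, by subst h; decide⟩
              · exact h3 ⟨x, hx, by subst h; decide⟩
              · exact h3 ⟨x, hx, by subst h; decide⟩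
              · exact h3 ⟨x, hx, by subst h; decide⟩
              · exact h3 ⟨x, hx, by subst h; decide⟩
              · exact h2 ⟨x, hx, by subst h; decide⟩
              · exact h2 ⟨x, hx, by subst h; decide⟩
              · exact h1 (Or.inl ((PySem.Set.mem_ofList names _).mpr (h ▸ hx)))
              · exact h1 (Or.inr ((PySem.Set.mem_ofList names _).mpr (h ▸ hx)))
            have hm : pvRankMax names = 0 := by omega
            rw [hm]
            rfl
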